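-- pv_equiv track=rewrite | github.com/AndreasGeyerTUD/masterarbeit | existing_dataset_analysis/existing_dataset_analysis.py | split_columns_for_plot
-- ===== SOURCE A (Python) =====
-- def split_columns_for_plot(columns: list) -> list[list]:
--     if len(columns) > 10:
--         splitted_columns = []
--         split = int(len(columns) / 2)
--         first = columns[split:]
--         second = columns[:split]
--         if split > 10:
--             for spl in split_columns_for_plot(first):
--                 splitted_columns.append(spl)
--             for spl in split_columns_for_plot(second):
--                 splitted_columns.append(spl)
--         else:
--             splitted_columns.append(first)
--             splitted_columns.append(second)
--
--         return splitted_columns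
--     else:
--         return [columns]
-- ===== SOURCE B (Python) =====
-- # B: no recursion -- iterative fixed-point refinement of a worklist of chunks.
-- # Repeatedly replace (in place) every chunk whose half-length exceeds 10 by its
-- # two halves (right half first, as A emits them); once no chunk needs further
-- # splitting, a final pass splits each remaining chunk of length > 10 once.
-- # In-place expansion preserves the depth-first leaf order of A's recursion tree.
--
-- def split_columns_for_plot(columns: list) -> list[list]:
--     chunks = [columns]
--     while any(len(c) // 2 > 10 for c in chunks):
--         nxt = []
--         for c in chunks:
--             if len(c) // 2 > 10:
--                 m = len(c) // 2
--                 nxt.append(c[m:])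
--                 nxt.append(c[:m])
--             else:
--                 nxt.append(c)
--         chunks = nxt
--     out = []
--     for c in chunks:
--         if len(c) > 10:
--             m = len(c) // 2
--             out.append(c[m:])
--             out.append(c[:m])
--         else:
--             out.append(c)
--     return out
-- ===== Notes on version B (the rewrite author's own statement) =====
-- stated objective: alternative
-- what changed: B replaces A's depth-first recursion with a non-recursive fixed-point loop over a worklist of chunks: each pass expands every chunk whose half-length exceeds 10 into its two halves in place, then a final pass splits remaining >10 chunks once; in-place expansion preserves A's DFS emission order.
import Mathlib
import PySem

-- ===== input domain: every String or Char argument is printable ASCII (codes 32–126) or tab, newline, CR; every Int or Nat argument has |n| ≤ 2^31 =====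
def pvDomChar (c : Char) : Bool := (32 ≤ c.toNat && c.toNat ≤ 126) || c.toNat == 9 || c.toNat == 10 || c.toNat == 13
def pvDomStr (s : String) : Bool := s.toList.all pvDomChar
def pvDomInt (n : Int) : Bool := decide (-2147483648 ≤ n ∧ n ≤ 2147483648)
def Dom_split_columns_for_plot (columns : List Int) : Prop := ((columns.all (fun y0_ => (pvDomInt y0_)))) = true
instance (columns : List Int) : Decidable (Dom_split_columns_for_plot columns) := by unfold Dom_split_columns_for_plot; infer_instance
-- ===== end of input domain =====

-- B replaces A's recursion by a non-recursive worklist loop that repeatedly expands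
-- oversized chunks in place (alternative decomposition, same cost).


-- ===== PORT A =====
-- int(len(columns)/2) on a nonnegative length is exactly Nat division by 2.
def split_columns_for_plot (columns : List Int) : List (List Int) :=
  if columns.length > 10 then
    let split := columns.length / 2
    let first := PySem.List.slice columns (some (split : Int)) none
    let second := PySem.List.slice columns none (some (split : Int))
    if split > 10 then
      split_columns_for_plot first ++ split_columns_for_plot second
    else
      [first, second]
  else
    [columns]
termination_by columns.length
decreasing_by
  · simp only [PySem.List.slice_from_natCast, List.length_drop]; omega
  · simp only [PySem.List.slice_to_natCast, List.length_take]; omega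

-- ===== PORT B =====
-- one chunk's expansion in the refinement pass: split iff its half-length exceeds 10
def pvSplitBig (c : List Int) : List (List Int) :=
  if c.length / 2 > 10 then
    [PySem.List.slice c (some ((c.length / 2 : Nat) : Int)) none,
     PySem.List.slice c none (some ((c.length / 2 : Nat) : Int))]
  else
    [c]

-- the final pass: split any remaining chunk of length > 10 once
def pvFinalSplit (c : List Int) : List (List Int) :=
  if c.length > 10 then
    [PySem.List.slice c (some ((c.length / 2 : Nat) : Int)) none,
     PySem.List.slice c none (some ((c.length / 2 : Nat) : Int))]
  else
    [c]

-- measure for the while loop: the largest chunk length in the worklist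
def pvMaxLen (L : List (List Int)) : Nat := L.foldr (fun c m => max c.length m) 0

theorem pv_len_le_maxLen (L : List (List Int)) : ∀ c ∈ L, c.length ≤ pvMaxLen L := by
  induction L with
  | nil => simp
  | cons d t ih =>
      intro c hc
      rcases List.mem_cons.mp hc with h | h
      · subst h; simp [pvMaxLen]
      · simp only [pvMaxLen, List.foldr_cons]
        exact le_trans (ih c h) (le_max_right _ _)

theorem pv_maxLen_lt (L : List (List Int)) (M : Nat) (hM : 0 < M)
    (h : ∀ c ∈ L, c.length < M) : pvMaxLen L < M := by
  induction L with
  | nil => simpa [pvMaxLen]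
  | cons d t ih =>
      simp only [pvMaxLen, List.foldr_cons]
      have h1 := h d (by simp)
      have h2 := ih (fun c hc => h c (List.mem_cons_of_mem _ hc))
      simp only [pvMaxLen] at h2
      omega

theorem pv_refine_decreases (chunks : List (List Int))
    (h : chunks.any (fun c => decide (c.length / 2 > 10)) = true) :
    pvMaxLen (chunks.flatMap pvSplitBig) < pvMaxLen chunks := by
  rcases List.any_eq_true.mp h with ⟨c0, hc0, hbig⟩
  have hbig' : c0.length / 2 > 10 := by simpa using hbig
  have hM : 22 ≤ pvMaxLen chunks :=
    le_trans (by omega) (pv_len_le_maxLen chunks c0 hc0)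
  apply pv_maxLen_lt _ _ (by omega)
  intro d hd
  rcases List.mem_flatMap.mp hd with ⟨c, hc, hdc⟩
  have hcM := pv_len_le_maxLen chunks c hc
  unfold pvSplitBig at hdc
  by_cases hb : c.length / 2 > 10
  · simp only [hb, if_true, List.mem_cons] at hdc
    rcases hdc with rfl | rfl | h'
    · rw [PySem.List.slice_from_natCast]; simp only [List.length_drop]; omega
    · rw [PySem.List.slice_to_natCast]; simp only [List.length_take]; omega
    · cases h'
  · simp only [hb, if_false, List.mem_singleton] at hdc
    subst hdc; omega

-- the while loop: refine the worklist until no chunk's half-length exceeds 10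
def pvRefine (chunks : List (List Int)) : List (List Int) :=
  if chunks.any (fun c => decide (c.length / 2 > 10)) then
    pvRefine (chunks.flatMap pvSplitBig)
  else
    chunks
termination_by pvMaxLen chunks
decreasing_by
  simp only [List.flatMap_subtype, List.unattach_attach]
  exact pv_refine_decreases chunks (by assumption)

def split_columns_for_plot_alt (columns : List Int) : List (List Int) :=
  (pvRefine [columns]).flatMap pvFinalSplit

-- ===== PRECONDITION & SPEC =====
def Spec_split_columns_for_plot (columns : List Int) (out : List (List Int)) : Prop := out = split_columns_for_plot_alt columns
instance (columns : List Int) (out : List (List Int)) : Decidable (Spec_split_columns_for_plot columns out) := by unfold Spec_split_columns_for_plot; infer_instance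

-- ===== CLAIM (what is proved, stated in full; the proofs are below) =====
def Claim_equal_split_columns_for_plot : Prop := ∀ (columns : List Int), Dom_split_columns_for_plot columns → Spec_split_columns_for_plot columns (split_columns_for_plot columns)

-- ===== LEMMAS AND PROOFS =====

theorem pv_flatMap_congr {f g : List Int → List (List Int)} :
    ∀ (L : List (List Int)), (∀ c ∈ L, f c = g c) → L.flatMap f = L.flatMap g := by
  intro L h
  induction L with
  | nil => rfl
  | cons d t ih =>
      simp only [List.flatMap_cons, h d (by simp),
        ih (fun c hc => h c (List.mem_cons_of_mem _ hc))]

-- expanding one oversized chunk commutes with A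
theorem pv_splitBig_A (c : List Int) :
    (pvSplitBig c).flatMap split_columns_for_plot = split_columns_for_plot c := by
  unfold pvSplitBig
  by_cases hb : c.length / 2 > 10
  · have hlen : c.length > 10 := by omega
    conv_rhs => rw [split_columns_for_plot]
    simp [hb, hlen]
  · simp [hb]

-- a chunk no pass will split further is finished off exactly as A finishes it
theorem pv_finalSplit_A (c : List Int) (h : ¬ c.length / 2 > 10) :
    pvFinalSplit c = split_columns_for_plot c := by
  unfold pvFinalSplit
  conv_rhs => rw [split_columns_for_plot]
  by_cases hlen : c.length > 10
  · simp [hlen, h]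
  · simp [hlen]

-- loop invariant: the finished expansion of the worklist is A applied chunkwise
theorem pv_refine_A (chunks : List (List Int)) :
    (pvRefine chunks).flatMap pvFinalSplit = chunks.flatMap split_columns_for_plot := by
  induction chunks using pvRefine.induct with
  | case1 chunks hcond ih =>
      simp only [List.flatMap_subtype, List.unattach_attach] at ih
      rw [pvRefine, if_pos hcond, ih, List.flatMap_assoc]
      exact pv_flatMap_congr chunks (fun c _ => pv_splitBig_A c)
  | case2 chunks hcond =>
      rw [pvRefine, if_neg hcond]
      apply pv_flatMap_congr
      intro c hc
      apply pv_finalSplit_A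
      intro hbig
      exact hcond (List.any_eq_true.mpr ⟨c, hc, by simpa using hbig⟩)

-- ===== VERDICT (by name: the statement is the Claim_ definition above) =====
theorem split_columns_for_plot_spec : Claim_equal_split_columns_for_plot := by
  intro columns _
  unfold Spec_split_columns_for_plot split_columns_for_plot_alt
  rw [pv_refine_A]
  simp
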